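-- pv_equiv track=rewrite | github.com/AshfordLee/Stanford_CS336 | assignment1-basics/cs336_basics/bpe.py | find_best_pair
-- ===== SOURCE A (Python) =====
-- def find_best_pair(pair_frequencies):
--     if not pair_frequencies:
--         return None
--
--     best_pair = tuple()
--     max_freq = -1
--
--     for pair,freq in pair_frequencies.items():
--         if freq > max_freq:
--             max_freq = freq
--             best_pair = pair
--
--         elif freq == max_freq:
--             best_pair = max(best_pair,pair)
--
--     return best_pair
-- ===== SOURCE B (Python) =====
-- def find_best_pair(pair_frequencies):
--     if not pair_frequencies:
--         return None
--     max_freq = max(pair_frequencies.values())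
--     return max(p for p, f in pair_frequencies.items() if f == max_freq)
-- ===== Notes on version B (the rewrite author's own statement) =====
-- stated objective: simpler
-- what changed: Replaces A's single fused accumulator loop (running max frequency with a -1 sentinel plus incremental lexicographic tie-break) by two differently-shaped passes: max over the frequency values, then max over the pairs filtered to that peak frequency; Pre_ excludes nonempty inputs whose frequencies are all below -1, where A's -1 sentinel makes it return an empty Python tuple, which is not a value of the declared pair type.
-- outside the precondition, e.g. on find_best_pair({('a', 'b'): -5}): A returns (), B returns ('a', 'b')
import Mathlib
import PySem

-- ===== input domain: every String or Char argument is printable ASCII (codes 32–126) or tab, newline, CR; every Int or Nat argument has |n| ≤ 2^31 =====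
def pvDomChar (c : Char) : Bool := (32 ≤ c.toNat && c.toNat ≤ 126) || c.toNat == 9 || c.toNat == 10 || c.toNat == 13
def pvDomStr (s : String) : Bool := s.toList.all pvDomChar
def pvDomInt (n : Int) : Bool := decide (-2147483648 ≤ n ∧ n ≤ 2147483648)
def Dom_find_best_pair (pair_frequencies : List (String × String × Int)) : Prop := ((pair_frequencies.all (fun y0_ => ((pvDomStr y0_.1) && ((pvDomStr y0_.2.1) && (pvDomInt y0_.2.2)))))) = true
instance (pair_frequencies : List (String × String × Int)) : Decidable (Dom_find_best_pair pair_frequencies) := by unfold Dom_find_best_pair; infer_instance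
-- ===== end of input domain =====

-- B replaces A's fused accumulator loop by two passes (max of values, then max of the pairs at that frequency); equal return values on Pre_.

-- ===== PORT A =====
-- Python max(a, b) on pairs of strings: lexicographic, returns the first argument on ties.
def pairMax (a b : String × String) : String × String :=
  if a.1 < b.1 ∨ (a.1 = b.1 ∧ a.2 < b.2) then b else a

-- A's best_pair starts as the empty tuple (); we model it as `none` (Python's max((), p) = p since () < any pair).
def tupleMax (ob : Option (String × String)) (p : String × String) : Option (String × String) :=
  match ob with
  | none => some p
  | some q => some (pairMax q p)

-- the body of A's for-loop
def stepA (st : Option (String × String) × Int) (p : String × String × Int) : Option (String × String) × Int :=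
  if st.2 < p.2.2 then (some (p.1, p.2.1), p.2.2)
  else if p.2.2 = st.2 then (tupleMax st.1 (p.1, p.2.1), st.2)
  else st

def find_best_pair (pair_frequencies : List (String × String × Int)) : Option (String × String) :=
  if pair_frequencies = [] then none
  else (pair_frequencies.foldl stepA (none, -1)).1

-- ===== PORT B =====
def find_best_pair_alt (pair_frequencies : List (String × String × Int)) : Option (String × String) :=
  match pair_frequencies with
  | [] => none
  | x :: t =>
    let maxFreq := (t.map (fun p => p.2.2)).foldl max x.2.2   -- max(pair_frequencies.values())
    match ((x :: t).filter (fun p => p.2.2 == maxFreq)).map (fun p => (p.1, p.2.1)) with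
    | [] => none   -- unreachable: maxFreq occurs among the values (Python's max would raise on empty)
    | y :: ys => some (ys.foldl pairMax y)   -- max(generator)

-- ===== PRECONDITION & SPEC =====
-- Pre_ excludes nonempty inputs all of whose frequencies are below -1: there A's -1 sentinel is never
-- beaten and A returns an empty Python tuple, not a value of the declared pair type.
def Pre_find_best_pair (pair_frequencies : List (String × String × Int)) : Prop :=
  pair_frequencies = [] ∨ ∃ p ∈ pair_frequencies, (-1 : Int) ≤ p.2.2
instance (pair_frequencies : List (String × String × Int)) : Decidable (Pre_find_best_pair pair_frequencies) := by unfold Pre_find_best_pair; infer_instance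

def pvWitness_find_best_pair : (List (String × String × Int)) := [("a", "b", 2), ("c", "a", 2)]

def Spec_find_best_pair (pair_frequencies : List (String × String × Int)) (out : Option (String × String)) : Prop := out = find_best_pair_alt pair_frequencies
instance (pair_frequencies : List (String × String × Int)) (out : Option (String × String)) : Decidable (Spec_find_best_pair pair_frequencies out) := by unfold Spec_find_best_pair; infer_instance

-- ===== CLAIM (what is proved, stated in full; the proofs are below) =====
def Claim_equal_find_best_pair : Prop := ∀ (pair_frequencies : List (String × String × Int)), Dom_find_best_pair pair_frequencies → Pre_find_best_pair pair_frequencies → Spec_find_best_pair pair_frequencies (find_best_pair pair_frequencies)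

-- ===== LEMMAS AND PROOFS =====

-- running max of the frequencies, A-shaped
def mstep (a : Int) (p : String × String × Int) : Int := max a p.2.2

lemma foldl_mstep_max (l : List (String × String × Int)) : ∀ a b,
    l.foldl mstep (max a b) = max a (l.foldl mstep b) := by
  induction l with
  | nil => intro a b; rfl
  | cons p t ih =>
    intro a b
    simp only [List.foldl_cons, mstep, max_assoc]
    exact ih a (max b p.2.2)

lemma le_foldl_mstep (l : List (String × String × Int)) : ∀ a, a ≤ l.foldl mstep a := by
  induction l with
  | nil => intro a; exact le_refl a
  | cons p t ih => intro a; exact le_trans (le_max_left _ _) (ih (max a p.2.2))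

lemma mem_le_foldl_mstep (l : List (String × String × Int)) : ∀ a, ∀ p ∈ l, p.2.2 ≤ l.foldl mstep a := by
  induction l with
  | nil => intro a p hp; cases hp
  | cons q t ih =>
    intro a p hp
    rcases List.mem_cons.mp hp with hp | hp
    · subst hp
      exact le_trans (le_max_right a p.2.2) (le_foldl_mstep t _)
    · exact ih (max a q.2.2) p hp

lemma foldl_mstep_mem (l : List (String × String × Int)) : ∀ a,
    l.foldl mstep a = a ∨ ∃ p ∈ l, p.2.2 = l.foldl mstep a := by
  induction l with
  | nil => intro a; exact Or.inl rfl
  | cons q t ih =>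
    intro a
    rcases ih (max a q.2.2) with h | ⟨p, hp, hpe⟩
    · rcases max_choice a q.2.2 with hm | hm
      · exact Or.inl (by show t.foldl mstep (max a q.2.2) = a; rw [h, hm])
      · exact Or.inr ⟨q, List.mem_cons_self,
          by show q.2.2 = t.foldl mstep (max a q.2.2); rw [h, hm]⟩
    · exact Or.inr ⟨p, List.mem_cons_of_mem _ hp, hpe⟩

-- the characterisation of A's loop: final frequency is the running max, final best is the
-- tupleMax-fold over the entries attaining it (starting from the carried best iff the max did not move)
lemma loopA (l : List (String × String × Int)) : ∀ (ob : Option (String × String)) (m : Int),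
    l.foldl stepA (ob, m)
      = ((l.filter (fun p => p.2.2 == l.foldl mstep m)).foldl
           (fun b p => tupleMax b (p.1, p.2.1))
           (if m = l.foldl mstep m then ob else none),
         l.foldl mstep m) := by
  induction l with
  | nil => intro ob m; simp
  | cons p t ih =>
    intro ob m
    have hM : (p :: t).foldl mstep m = t.foldl mstep (max m p.2.2) := rfl
    by_cases h1 : m < p.2.2
    · have hmax : max m p.2.2 = p.2.2 := max_eq_right (le_of_lt h1)
      have hmne : m ≠ t.foldl mstep (max m p.2.2) := by
        have := le_foldl_mstep t (max m p.2.2)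
        intro he; rw [← he] at this; omega
      simp only [List.foldl_cons, stepA, if_pos h1, hM, List.filter_cons, hmax] at *
      rw [ih (some (p.1, p.2.1)) p.2.2, if_neg hmne]
      by_cases h2 : p.2.2 = t.foldl mstep p.2.2
      · simp [← h2, tupleMax]
      · simp [h2]
    · by_cases h2 : p.2.2 = m
      · have hmax : max m p.2.2 = m := max_eq_left (le_of_eq h2)
        simp only [List.foldl_cons, stepA, if_neg h1, if_pos h2, hM, hmax, List.filter_cons]
        rw [ih (tupleMax ob (p.1, p.2.1)) m]
        by_cases h3 : m = t.foldl mstep m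
        · simp [h2, ← h3]
        · have : ¬ (p.2.2 == t.foldl mstep m) = true := by
            simp only [beq_iff_eq]; rw [h2]; exact h3
          simp [this, h3]
      · have h3 : p.2.2 < m := lt_of_le_of_ne (le_of_not_gt h1) h2
        have hmax : max m p.2.2 = m := max_eq_left (le_of_lt h3)
        have hne : ¬ (p.2.2 == t.foldl mstep m) = true := by
          simp only [beq_iff_eq]
          have := le_foldl_mstep t m
          intro he; omega
        simp only [List.foldl_cons, stepA, if_neg h1, if_neg h2, hM, hmax, List.filter_cons, hne]
        exact ih ob m

lemma fold_tupleMax_some (qs : List (String × String × Int)) : ∀ (q : String × String),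
    qs.foldl (fun b p => tupleMax b (p.1, p.2.1)) (some q)
      = some ((qs.map (fun p => (p.1, p.2.1))).foldl pairMax q) := by
  induction qs with
  | nil => intro q; rfl
  | cons p t ih => intro q; simpa [tupleMax] using ih (pairMax q (p.1, p.2.1))

lemma alt_cons (x : String × String × Int) (t : List (String × String × Int)) :
    find_best_pair_alt (x :: t)
      = (match ((x :: t).filter
            (fun p => p.2.2 == (t.map (fun p => p.2.2)).foldl max x.2.2)).map
            (fun p => (p.1, p.2.1)) with
         | [] => none
         | y :: ys => some (ys.foldl pairMax y)) := rfl

-- ===== VERDICT (by name: the statement is the Claim_ definition above) =====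
theorem find_best_pair_spec : Claim_equal_find_best_pair := by
  intro l _hdom hpre
  unfold Spec_find_best_pair
  cases l with
  | nil => rfl
  | cons x t =>
    rcases hpre with hnil | ⟨p, hp, hge⟩
    · cases hnil
    have hmf : (x :: t).foldl mstep (-1) = t.foldl mstep x.2.2 := by
      have h2 := foldl_mstep_max t (-1) x.2.2
      have h3 : (-1 : Int) ≤ t.foldl mstep x.2.2 := by
        rcases List.mem_cons.mp hp with hp' | hp'
        · exact le_trans hge (hp' ▸ le_foldl_mstep t x.2.2)
        · exact le_trans hge (mem_le_foldl_mstep t x.2.2 p hp')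
      show t.foldl mstep (max (-1) x.2.2) = _
      rw [h2]; exact max_eq_right h3
    have hmap : (t.map (fun p => p.2.2)).foldl max x.2.2 = t.foldl mstep x.2.2 := by
      rw [List.foldl_map]; rfl
    have hex : ∃ q ∈ (x :: t), q.2.2 = t.foldl mstep x.2.2 := by
      rcases foldl_mstep_mem t x.2.2 with h | ⟨q, hq, hqe⟩
      · exact ⟨x, List.mem_cons_self, h.symm⟩
      · exact ⟨q, List.mem_cons_of_mem _ hq, hqe⟩
    rw [alt_cons, hmap]
    unfold find_best_pair
    rw [if_neg (by simp : ¬ (x :: t) = ([] : List (String × String × Int)))]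
    rw [loopA (x :: t) none (-1), hmf]
    simp only [ite_self]
    rcases hf : (x :: t).filter (fun p => p.2.2 == t.foldl mstep x.2.2) with _ | ⟨q, qs⟩
    · exfalso
      rcases hex with ⟨q, hq, hqe⟩
      have hmem : q ∈ (x :: t).filter (fun p => p.2.2 == t.foldl mstep x.2.2) := by
        rw [List.mem_filter]; exact ⟨hq, by simpa using hqe⟩
      rw [hf] at hmem; cases hmem
    · rw [hf]
      simp only [List.foldl_cons, List.map_cons]
      exact fold_tupleMax_some qs (q.1, q.2.1)
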